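-- pv_equiv track=rewrite | github.com/dhiksha08/Hackathon-Mock | Solutions/Level1/try.py | split_sequence
-- ===== SOURCE A (Python) =====
-- def split_sequence(arr, k):
--   """
--   Divides a sequence into sub-sequences with sum less than or equal to k.
--
--   Args:
--     arr: A list of integers representing the sequence.
--     k: The maximum allowed sum for each sub-sequence.
--
--   Returns:
--     A list of lists, where each sub-list represents a sub-sequence.
--   """
--   subsequences = []
--   current_sum = 0
--   current_subsequence = []
--   for element in arr:
--     if current_sum + element <= k:
--       current_sum += element
--       current_subsequence.append(element)
--     else:
--       if current_subsequence:
--         subsequences.append(current_subsequence)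
--       current_sum = element
--       current_subsequence = [element]
--   if current_subsequence:
--     subsequences.append(current_subsequence)
--   return subsequences
--
-- arr = [70, 70, 90, 50, 70, 90, 110, 70, 110, 70, 70, 110, 110, 90, 50, 90, 110, 90, 70, 110]
--
-- k = 600
--
-- subsequences = split_sequence(arr, k)
-- ===== SOURCE B (Python) =====
-- def split_sequence(arr, k):
--   """Group decomposition: repeatedly scan for the end of the next greedy group
--   (first element taken unconditionally, extended while the running sum stays <= k)
--   and emit it as one slice of arr."""
--   subsequences = []
--   n = len(arr)
--   start = 0
--   while start < n:
--     s = arr[start]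
--     j = start + 1
--     while j < n and s + arr[j] <= k:
--       s += arr[j]
--       j += 1
--     subsequences.append(arr[start:j])
--     start = j
--   return subsequences
-- ===== Notes on version B (the rewrite author's own statement) =====
-- stated objective: simpler
-- what changed: Replaced A's single accumulator loop that grows each subsequence element-by-element (with a branch for the empty current list) by a group decomposition: an inner scan finds the end of each greedy group, which is emitted as one slice of arr; the first element of every group is taken unconditionally, which subsumes A's empty-current-list branch.
import Mathlib
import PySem

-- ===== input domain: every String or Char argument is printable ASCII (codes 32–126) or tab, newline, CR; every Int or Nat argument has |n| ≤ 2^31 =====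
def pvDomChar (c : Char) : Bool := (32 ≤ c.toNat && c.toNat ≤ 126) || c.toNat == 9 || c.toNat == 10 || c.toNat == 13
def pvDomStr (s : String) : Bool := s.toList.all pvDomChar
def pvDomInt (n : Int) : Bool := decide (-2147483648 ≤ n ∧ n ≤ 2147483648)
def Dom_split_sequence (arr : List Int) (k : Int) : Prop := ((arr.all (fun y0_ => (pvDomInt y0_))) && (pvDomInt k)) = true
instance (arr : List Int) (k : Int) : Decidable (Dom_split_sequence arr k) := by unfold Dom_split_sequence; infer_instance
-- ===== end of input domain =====

-- B replaces A's accumulator loop by a recursive group decomposition (scan for the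
-- group end, emit the slice, recurse on the rest); same result, objective: simpler.

-- ===== PORT A =====
-- state: (subsequences, current_sum, current_subsequence)
def split_sequence (arr : List Int) (k : Int) : List (List Int) :=
  let st := arr.foldl
    (fun (st : List (List Int) × Int × List Int) element =>
      let (subsequences, current_sum, current_subsequence) := st
      if current_sum + element ≤ k then
        (subsequences, current_sum + element, current_subsequence ++ [element])
      else
        ((if current_subsequence ≠ [] then subsequences ++ [current_subsequence]
          else subsequences), element, [element]))
    ([], 0, [])
  if st.2.2 ≠ [] then st.1 ++ [st.2.2] else st.1

-- ===== PORT B =====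
-- the `while j < len(arr) and s + arr[j] <= k` scan: number of elements joining the group
def groupLen (k s : Int) : List Int → Nat
  | [] => 0
  | e :: rest => if s + e ≤ k then groupLen k (s + e) rest + 1 else 0

def split_sequence_alt (arr : List Int) (k : Int) : List (List Int) :=
  match arr with
  | [] => []
  | e :: rest =>
    let j := groupLen k e rest
    (e :: rest.take j) :: split_sequence_alt (rest.drop j) k
termination_by arr.length
decreasing_by simp

-- ===== PRECONDITION & SPEC =====
def Spec_split_sequence (arr : List Int) (k : Int) (out : List (List Int)) : Prop := out = split_sequence_alt arr k
instance (arr : List Int) (k : Int) (out : List (List Int)) : Decidable (Spec_split_sequence arr k out) := by unfold Spec_split_sequence; infer_instance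

-- ===== CLAIM (what is proved, stated in full; the proofs are below) =====
def Claim_equal_split_sequence : Prop := ∀ (arr : List Int) (k : Int), Dom_split_sequence arr k → Spec_split_sequence arr k (split_sequence arr k)

-- ===== LEMMAS AND PROOFS =====

def pvStep (k : Int) (st : List (List Int) × Int × List Int) (element : Int) :
    List (List Int) × Int × List Int :=
  let (subsequences, current_sum, current_subsequence) := st
  if current_sum + element ≤ k then
    (subsequences, current_sum + element, current_subsequence ++ [element])
  else
    ((if current_subsequence ≠ [] then subsequences ++ [current_subsequence]
      else subsequences), element, [element])

def pvFinish (st : List (List Int) × Int × List Int) : List (List Int) :=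
  if st.2.2 ≠ [] then st.1 ++ [st.2.2] else st.1

lemma split_sequence_eq_finish (arr : List Int) (k : Int) :
    split_sequence arr k = pvFinish (arr.foldl (pvStep k) ([], 0, [])) := rfl

lemma split_sequence_alt_nil (k : Int) : split_sequence_alt [] k = [] := by
  rw [split_sequence_alt.eq_def]

lemma split_sequence_alt_cons (e : Int) (rest : List Int) (k : Int) :
    split_sequence_alt (e :: rest) k =
      (e :: rest.take (groupLen k e rest)) ::
        split_sequence_alt (rest.drop (groupLen k e rest)) k := by
  rw [split_sequence_alt.eq_def]

-- loop invariant: with a non-empty current group, finishing the fold yields the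
-- completed groups, then the current group extended by the first-group scan, then B's recursion
lemma fold_invariant (k : Int) (l : List Int) :
    ∀ (subs : List (List Int)) (cs : Int) (cur : List Int), cur ≠ [] →
    pvFinish (l.foldl (pvStep k) (subs, cs, cur)) =
      subs ++ (cur ++ l.take (groupLen k cs l)) ::
        split_sequence_alt (l.drop (groupLen k cs l)) k := by
  induction l with
  | nil =>
    intro subs cs cur hcur
    simp [pvFinish, hcur, split_sequence_alt_nil, groupLen]
  | cons e t ih =>
    intro subs cs cur hcur
    by_cases h : cs + e ≤ k
    · simp only [List.foldl_cons, pvStep, h, if_pos]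
      rw [ih (subs) (cs + e) (cur ++ [e]) (by simp)]
      simp [groupLen, h, List.append_assoc]
    · simp only [List.foldl_cons, pvStep, h, if_neg, hcur, ne_eq,
        not_false_eq_true, if_true]
      rw [ih (subs ++ [cur]) e [e] (by simp)]
      simp [groupLen, h, split_sequence_alt_cons]

theorem split_sequence_eq_alt (arr : List Int) (k : Int) :
    split_sequence arr k = split_sequence_alt arr k := by
  cases arr with
  | nil => rw [split_sequence_alt_nil]; rfl
  | cons e rest =>
    rw [split_sequence_eq_finish]
    have hfirst : pvStep k ([], 0, []) e = ([], e, [e]) := by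
      by_cases h : (0 : Int) + e ≤ k
      · simp [pvStep, h]
      · simp [pvStep, h]
    rw [List.foldl_cons, hfirst, fold_invariant k rest [] e [e] (by simp),
      split_sequence_alt_cons]
    simp

-- ===== VERDICT (by name: the statement is the Claim_ definition above) =====
theorem split_sequence_spec : Claim_equal_split_sequence := by
  intro arr k _
  unfold Spec_split_sequence
  exact split_sequence_eq_alt arr k
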